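-- pv_equiv track=rewrite | github.com/Balajimcr/SystemVerilogToPython | sv_to_pyvsc.py | _find_matching_begin_end
-- ===== SOURCE A (Python) =====
-- def _find_matching_begin_end(text: str, start: int) -> int:
--     """Find matching 'end' for 'begin' at position start."""
--     depth = 1
--     i = start + 5  # Skip past 'begin'
--     while i < len(text) and depth > 0:
--         # Check for 'begin' keyword
--         if text[i:i+5] == 'begin' and (i == 0 or not text[i-1].isalnum()):
--             if i + 5 >= len(text) or not text[i+5].isalnum():
--                 depth += 1
--         # Check for 'end' keyword (but not 'endclass', 'endfunction', etc.)
--         elif text[i:i+3] == 'end' and (i == 0 or not text[i-1].isalnum()):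
--             if i + 3 >= len(text) or not text[i+3].isalnum():
--                 depth -= 1
--                 if depth == 0:
--                     return i + 2  # Return position of last char of 'end'
--         i += 1
--     return -1
-- ===== SOURCE B (Python) =====
-- import re
--
-- def _find_matching_begin_end(text: str, start: int) -> int:
--     """Find matching 'end' for 'begin' at position start (regex token scan)."""
--     depth = 1
--     lo = start + 5  # skip past 'begin'
--     n = len(text)
--     for m in re.finditer(r'begin|end', text):
--         i = m.start()
--         if i < lo:
--             continue
--         if i != 0 and text[i - 1].isalnum():
--             continue
--         if m.group() == 'begin':
--             if i + 5 >= n or not text[i + 5].isalnum():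
--                 depth += 1
--         else:
--             if i + 3 >= n or not text[i + 3].isalnum():
--                 depth -= 1
--                 if depth == 0:
--                     return i + 2
--     return -1
-- ===== Notes on version B (the rewrite author's own statement) =====
-- stated objective: alternative
-- what changed: Replaces A's single character-by-character while-loop (slice comparison at every index) by a two-pass design: a regex-style finditer pass enumerates non-overlapping 'begin'/'end' token positions, then a fold over those matches applies the start+5 skip, the isalnum boundary tests and the depth counter.
-- outside the precondition, e.g. on _find_matching_begin_end(' end  zzzz', -14): A returns -7, B returns 3; on _find_matching_begin_end('begin end', -100): A raises IndexError, B returns -1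
import Mathlib
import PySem

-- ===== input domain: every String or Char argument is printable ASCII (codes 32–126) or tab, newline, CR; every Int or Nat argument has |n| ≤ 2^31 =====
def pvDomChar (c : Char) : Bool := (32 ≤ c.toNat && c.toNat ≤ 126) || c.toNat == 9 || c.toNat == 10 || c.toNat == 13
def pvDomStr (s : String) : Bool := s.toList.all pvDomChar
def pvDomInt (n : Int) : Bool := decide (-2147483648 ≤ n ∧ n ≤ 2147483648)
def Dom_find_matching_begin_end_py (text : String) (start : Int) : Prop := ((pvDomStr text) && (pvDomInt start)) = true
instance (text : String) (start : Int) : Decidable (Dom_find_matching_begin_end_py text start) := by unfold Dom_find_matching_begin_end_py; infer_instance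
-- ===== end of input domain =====

-- B replaces A's per-character while-loop by a regex-style two-pass token scan (enumerate 'begin'/'end'
-- candidates, then fold over them); objective: alternative decomposition, equal value proved on start ≥ -5.

-- ===== PORT A =====
-- A's while-loop: i scans one character at a time, depth counter, early return at the matching 'end'.
def pvLoopA (cs : List Char) : Nat → Int → Int → Int
  | 0, _, _ => -1
  | fuel + 1, i, depth =>
    if i < (cs.length : Int) ∧ depth > 0 then
      if PySem.List.slice cs (some i) (some (i + 5)) = ['b','e','g','i','n'] ∧
          (i = 0 ∨ ¬ (PySem.Chars.isalnum (PySem.List.pyGetD cs (i - 1) ' ')) = true) then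
        if i + 5 ≥ (cs.length : Int) ∨ ¬ (PySem.Chars.isalnum (PySem.List.pyGetD cs (i + 5) ' ')) = true then
          pvLoopA cs fuel (i + 1) (depth + 1)
        else pvLoopA cs fuel (i + 1) depth
      else if PySem.List.slice cs (some i) (some (i + 3)) = ['e','n','d'] ∧
          (i = 0 ∨ ¬ (PySem.Chars.isalnum (PySem.List.pyGetD cs (i - 1) ' ')) = true) then
        if i + 3 ≥ (cs.length : Int) ∨ ¬ (PySem.Chars.isalnum (PySem.List.pyGetD cs (i + 3) ' ')) = true then
          if depth - 1 = 0 then i + 2 else pvLoopA cs fuel (i + 1) (depth - 1)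
        else pvLoopA cs fuel (i + 1) depth
      else pvLoopA cs fuel (i + 1) depth
    else -1

-- fuel = remaining loop iterations (structural guard only; the while-condition itself is checked inside)
def find_matching_begin_end_py (text : String) (start : Int) : Int :=
  pvLoopA text.toList ((text.toList.length : Int) - (start + 5)).toNat (start + 5) 1

-- ===== PORT B =====
-- First pass (re.finditer r'begin|end'): non-overlapping leftmost token scan; (pos, isBegin) list.
def pvScanTok (cs : List Char) : Nat → Nat → List (Nat × Bool)
  | 0, _ => []
  | fuel + 1, p =>
    if p < cs.length then
      if (cs.drop p).take 5 = ['b','e','g','i','n'] then (p, true) :: pvScanTok cs fuel (p + 5)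
      else if (cs.drop p).take 3 = ['e','n','d'] then (p, false) :: pvScanTok cs fuel (p + 3)
      else pvScanTok cs fuel (p + 1)
    else []

-- Second pass: Source B's for-loop over the matches, with the i < lo and boundary 'continue's.
def pvLoopB (cs : List Char) (lo : Int) (depth : Int) : List (Nat × Bool) → Int
  | [] => -1
  | (i, isBeg) :: rest =>
    if (i : Int) < lo then pvLoopB cs lo depth rest
    else if i ≠ 0 ∧ (PySem.Chars.isalnum (PySem.List.pyGetD cs ((i : Int) - 1) ' ')) = true then
      pvLoopB cs lo depth rest
    else if isBeg then
      if (i : Int) + 5 ≥ (cs.length : Int) ∨ ¬ (PySem.Chars.isalnum (PySem.List.pyGetD cs ((i : Int) + 5) ' ')) = true then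
        pvLoopB cs lo (depth + 1) rest
      else pvLoopB cs lo depth rest
    else
      if (i : Int) + 3 ≥ (cs.length : Int) ∨ ¬ (PySem.Chars.isalnum (PySem.List.pyGetD cs ((i : Int) + 3) ' ')) = true then
        if depth - 1 = 0 then (i : Int) + 2 else pvLoopB cs lo (depth - 1) rest
      else pvLoopB cs lo depth rest

def find_matching_begin_end_py_alt (text : String) (start : Int) : Int :=
  pvLoopB text.toList (start + 5) 1 (pvScanTok text.toList text.toList.length 0)

-- ===== PRECONDITION & SPEC =====
-- Pre_ excludes start < -5: there A's scan index goes negative, so Python's negative indexing wraps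
-- A's slices/char tests around to the end of the string (and text[i-1] can raise IndexError) — an
-- artefact of A's implementation that B's forward token scan does not reproduce.
def Pre_find_matching_begin_end_py (text : String) (start : Int) : Prop := -5 ≤ start
instance (text : String) (start : Int) : Decidable (Pre_find_matching_begin_end_py text start) := by
  unfold Pre_find_matching_begin_end_py; infer_instance

def pvWitness_find_matching_begin_end_py : String × Int := ("begin x end", 0)

def Spec_find_matching_begin_end_py (text : String) (start : Int) (out : Int) : Prop :=
  out = find_matching_begin_end_py_alt text start
instance (text : String) (start : Int) (out : Int) : Decidable (Spec_find_matching_begin_end_py text start out) := by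
  unfold Spec_find_matching_begin_end_py; infer_instance

-- ===== CLAIM (what is proved, stated in full; the proofs are below) =====
def Claim_equal_find_matching_begin_end_py : Prop := ∀ (text : String) (start : Int), Dom_find_matching_begin_end_py text start → Pre_find_matching_begin_end_py text start → Spec_find_matching_begin_end_py text start (find_matching_begin_end_py text start)

-- ===== LEMMAS AND PROOFS =====

-- step-1 occurrence scan: the reference token list both passes are compared against
def pvOcc (cs : List Char) (p : Nat) : List (Nat × Bool) :=
  if h : p < cs.length then
    if (cs.drop p).take 5 = ['b','e','g','i','n'] then (p, true) :: pvOcc cs (p + 1)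
    else if (cs.drop p).take 3 = ['e','n','d'] then (p, false) :: pvOcc cs (p + 1)
    else pvOcc cs (p + 1)
  else []
termination_by cs.length - p
decreasing_by all_goals omega

theorem pv_dropB (cs : List Char) (p : Nat) (h : (cs.drop p).take 5 = ['b','e','g','i','n']) :
    cs.drop p = 'b'::'e'::'g'::'i'::'n'::cs.drop (p + 5) := by
  conv_lhs => rw [← List.take_append_drop 5 (cs.drop p)]
  rw [h, List.drop_drop]; rfl

theorem pv_dropE (cs : List Char) (p : Nat) (h : (cs.drop p).take 3 = ['e','n','d']) :
    cs.drop p = 'e'::'n'::'d'::cs.drop (p + 3) := by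
  conv_lhs => rw [← List.take_append_drop 3 (cs.drop p)]
  rw [h, List.drop_drop]; rfl

theorem pv_drop_add (cs : List Char) (p j : Nat) : cs.drop (p + j) = (cs.drop p).drop j := by
  rw [List.drop_drop, Nat.add_comm]

theorem pv_occ_step (cs : List Char) (q : Nat)
    (hb : ¬ (cs.drop q).take 5 = ['b','e','g','i','n'])
    (he : ¬ (cs.drop q).take 3 = ['e','n','d']) : pvOcc cs q = pvOcc cs (q + 1) := by
  by_cases hq : q < cs.length
  · rw [pvOcc, dif_pos hq, if_neg hb, if_neg he]
  · rw [pvOcc, dif_neg hq, pvOcc, dif_neg (by omega)]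

theorem pv_occ_jumpB (cs : List Char) (p : Nat)
    (h : (cs.drop p).take 5 = ['b','e','g','i','n']) : pvOcc cs (p + 1) = pvOcc cs (p + 5) := by
  have hd := pv_dropB cs p h
  have h1 : cs.drop (p + 1) = 'e'::'g'::'i'::'n'::cs.drop (p + 5) := by
    rw [pv_drop_add cs p 1, hd]; simp
  have h2 : cs.drop (p + 2) = 'g'::'i'::'n'::cs.drop (p + 5) := by
    rw [pv_drop_add cs p 2, hd]; simp
  have h3 : cs.drop (p + 3) = 'i'::'n'::cs.drop (p + 5) := by
    rw [pv_drop_add cs p 3, hd]; simp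
  have h4 : cs.drop (p + 4) = 'n'::cs.drop (p + 5) := by
    rw [pv_drop_add cs p 4, hd]; simp
  rw [pv_occ_step cs (p+1) (by rw [h1]; simp) (by rw [h1]; simp)]
  rw [pv_occ_step cs (p+2) (by rw [h2]; simp) (by rw [h2]; simp)]
  rw [pv_occ_step cs (p+3) (by rw [h3]; simp) (by rw [h3]; simp)]
  rw [pv_occ_step cs (p+4) (by rw [h4]; simp) (by rw [h4]; simp)]

theorem pv_occ_jumpE (cs : List Char) (p : Nat)
    (h : (cs.drop p).take 3 = ['e','n','d']) : pvOcc cs (p + 1) = pvOcc cs (p + 3) := by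
  have hd := pv_dropE cs p h
  have h1 : cs.drop (p + 1) = 'n'::'d'::cs.drop (p + 3) := by
    rw [pv_drop_add cs p 1, hd]; simp
  have h2 : cs.drop (p + 2) = 'd'::cs.drop (p + 3) := by
    rw [pv_drop_add cs p 2, hd]; simp
  rw [pv_occ_step cs (p+1) (by rw [h1]; simp) (by rw [h1]; simp)]
  rw [pv_occ_step cs (p+2) (by rw [h2]; simp) (by rw [h2]; simp)]

theorem pv_occ_eq_scan (cs : List Char) (fuel : Nat) : ∀ (p : Nat), cs.length ≤ p + fuel →
    pvOcc cs p = pvScanTok cs fuel p := by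
  induction fuel with
  | zero =>
    intro p hf
    rw [pvOcc, dif_neg (by omega), pvScanTok]
  | succ f ihf =>
    intro p hf
    rw [pvOcc, pvScanTok]
    split
    · split_ifs with hb he
      · rw [pv_occ_jumpB cs p hb, ihf (p+5) (by omega)]
      · rw [pv_occ_jumpE cs p he, ihf (p+3) (by omega)]
      · exact ihf (p+1) (by omega)
    · rfl

theorem pv_loopA_eq_loopB (cs : List Char) (fuel : Nat) : ∀ (p : Nat) (depth lo : Int),
    cs.length ≤ p + fuel → lo ≤ (p : Int) → 0 < depth →
    pvLoopA cs fuel (p : Int) depth = pvLoopB cs lo depth (pvOcc cs p) := by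
  induction fuel with
  | zero =>
    intro p depth lo hf hlo hd
    rw [pvLoopA, pvOcc, dif_neg (by omega), pvLoopB]
  | succ f ihf =>
    intro p depth lo hf hlo hd
    by_cases hl : p < cs.length
    · have hc5 : ((p : Int) + 5) = (((p + 5 : Nat)) : Int) := by push_cast; ring
      have hc3 : ((p : Int) + 3) = (((p + 3 : Nat)) : Int) := by push_cast; ring
      have hc1 : ((p : Int) + 1) = (((p + 1 : Nat)) : Int) := by push_cast; ring
      have hs5 : PySem.List.slice cs (some (p : Int)) (some ((p : Int) + 5)) = (cs.drop p).take 5 := by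
        rw [hc5, PySem.List.slice_natCast]; congr 1; omega
      have hs3 : PySem.List.slice cs (some (p : Int)) (some ((p : Int) + 3)) = (cs.drop p).take 3 := by
        rw [hc3, PySem.List.slice_natCast]; congr 1; omega
      have hnl : ¬ ((p : Int) < lo) := by omega
      have ih := fun d (hd' : 0 < d) => ihf (p+1) d lo (by omega) (by omega) hd'
      rw [pvLoopA, if_pos ⟨by exact_mod_cast hl, hd⟩, pvOcc, dif_pos hl]
      by_cases hb : (cs.drop p).take 5 = ['b','e','g','i','n']
      · rw [if_pos hb, pvLoopB, if_neg hnl]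
        by_cases hskip : p ≠ 0 ∧ PySem.Chars.isalnum (PySem.List.pyGetD cs ((p : Int) - 1) ' ') = true
        · rw [if_pos hskip]
          have hbnd : ¬ ((p : Int) = 0 ∨ ¬ PySem.Chars.isalnum (PySem.List.pyGetD cs ((p : Int) - 1) ' ') = true) :=
            fun hc => hc.elim (fun h0 => hskip.1 (by exact_mod_cast h0)) (fun hnp => hnp hskip.2)
          rw [if_neg (fun hc => hbnd hc.2)]
          have he3 : ¬ PySem.List.slice cs (some (p : Int)) (some ((p : Int) + 3)) = ['e','n','d'] := by
            rw [hs3]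
            have := pv_dropB cs p hb
            rw [this]; simp
          rw [if_neg (fun hc => he3 hc.1), hc1]
          exact ih depth hd
        · rw [if_neg hskip]
          have hbnd : ((p : Int) = 0 ∨ ¬ PySem.Chars.isalnum (PySem.List.pyGetD cs ((p : Int) - 1) ' ') = true) := by
            by_cases hp0 : p = 0
            · exact Or.inl (by exact_mod_cast hp0)
            · exact Or.inr (fun hP => hskip ⟨hp0, hP⟩)
          rw [if_pos ⟨hs5.trans hb, hbnd⟩, if_pos rfl]
          by_cases hc : (p : Int) + 5 ≥ (cs.length : Int) ∨ ¬ PySem.Chars.isalnum (PySem.List.pyGetD cs ((p : Int) + 5) ' ') = true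
          · rw [if_pos hc, if_pos hc, hc1]
            exact ih (depth + 1) (by omega)
          · rw [if_neg hc, if_neg hc, hc1]
            exact ih depth hd
      · have hA1 : ¬ (PySem.List.slice cs (some (p : Int)) (some ((p : Int) + 5)) = ['b','e','g','i','n'] ∧
            ((p : Int) = 0 ∨ ¬ PySem.Chars.isalnum (PySem.List.pyGetD cs ((p : Int) - 1) ' ') = true)) := by
          rw [hs5]; exact fun hc => hb hc.1
        rw [if_neg hb, if_neg hA1]
        by_cases he : (cs.drop p).take 3 = ['e','n','d']
        · rw [if_pos he, pvLoopB, if_neg hnl]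
          by_cases hskip : p ≠ 0 ∧ PySem.Chars.isalnum (PySem.List.pyGetD cs ((p : Int) - 1) ' ') = true
          · rw [if_pos hskip]
            have hbnd : ¬ ((p : Int) = 0 ∨ ¬ PySem.Chars.isalnum (PySem.List.pyGetD cs ((p : Int) - 1) ' ') = true) :=
              fun hc => hc.elim (fun h0 => hskip.1 (by exact_mod_cast h0)) (fun hnp => hnp hskip.2)
            rw [if_neg (fun hc => hbnd hc.2), hc1]
            exact ih depth hd
          · rw [if_neg hskip]
            have hbnd : ((p : Int) = 0 ∨ ¬ PySem.Chars.isalnum (PySem.List.pyGetD cs ((p : Int) - 1) ' ') = true) := by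
              by_cases hp0 : p = 0
              · exact Or.inl (by exact_mod_cast hp0)
              · exact Or.inr (fun hP => hskip ⟨hp0, hP⟩)
            rw [if_pos ⟨hs3.trans he, hbnd⟩, if_neg (show ¬ (false = true) by simp)]
            by_cases hc : (p : Int) + 3 ≥ (cs.length : Int) ∨ ¬ PySem.Chars.isalnum (PySem.List.pyGetD cs ((p : Int) + 3) ' ') = true
            · rw [if_pos hc, if_pos hc]
              by_cases hz : depth - 1 = 0
              · rw [if_pos hz, if_pos hz]
              · rw [if_neg hz, if_neg hz, hc1]
                exact ih (depth - 1) (by omega)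
            · rw [if_neg hc, if_neg hc, hc1]
              exact ih depth hd
        · have hA2 : ¬ (PySem.List.slice cs (some (p : Int)) (some ((p : Int) + 3)) = ['e','n','d'] ∧
              ((p : Int) = 0 ∨ ¬ PySem.Chars.isalnum (PySem.List.pyGetD cs ((p : Int) - 1) ' ') = true)) := by
            rw [hs3]; exact fun hc => he hc.1
          rw [if_neg he, if_neg hA2, hc1]
          exact ih depth hd
    · rw [pvLoopA, if_neg (by omega), pvOcc, dif_neg hl, pvLoopB]

theorem pv_loopB_occ_lt (cs : List Char) (p L : Nat) (hp : p ≤ L) (depth : Int) :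
    pvLoopB cs (L : Int) depth (pvOcc cs p) = pvLoopB cs (L : Int) depth (pvOcc cs L) := by
  rcases Nat.lt_or_ge p L with h | h
  · have hstep : pvLoopB cs (L : Int) depth (pvOcc cs p) = pvLoopB cs (L : Int) depth (pvOcc cs (p+1)) := by
      rw [pvOcc]
      split
      · split_ifs with hb he
        · rw [pvLoopB, if_pos (by exact_mod_cast h)]
        · rw [pvLoopB, if_pos (by exact_mod_cast h)]
        · rfl
      · rw [pvOcc, dif_neg (by omega)]
    rw [hstep]
    exact pv_loopB_occ_lt cs (p+1) L h depth
  · have : p = L := by omega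
    rw [this]
termination_by L - p
decreasing_by omega

-- ===== VERDICT (by name: the statement is the Claim_ definition above) =====
theorem find_matching_begin_end_py_spec : Claim_equal_find_matching_begin_end_py := by
  intro text start _ hpre
  unfold Spec_find_matching_begin_end_py find_matching_begin_end_py find_matching_begin_end_py_alt
  have h0 : (0:Int) ≤ start + 5 := by
    unfold Pre_find_matching_begin_end_py at hpre; omega
  set cs := text.toList
  set L : Nat := (start + 5).toNat with hL
  have hcast : ((L : Int)) = start + 5 := by omega
  rw [← hcast,
    pv_loopA_eq_loopB cs ((cs.length : Int) - (L : Int)).toNat L 1 (L : Int) (by omega) le_rfl one_pos,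
    ← pv_occ_eq_scan cs cs.length 0 (by omega),
    pv_loopB_occ_lt cs 0 L (Nat.zero_le L) 1]
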